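-- pv_equiv track=rewrite | github.com/axel-22/ENSIBS | sécurité des communications/TP1/Axel_Jemai_TP2.py | codage_bloc
-- ===== SOURCE A (Python) =====
-- alphabet = "abcdefghijklmnopqrstuvwxyz "
--
-- def codage_bloc(phrase, alphabet, k):
--     L = len(alphabet)
--     code = []
--     # Ajouter un remplissage au dernier bloc si nécessaire
--     if len(phrase) % k != 0:
--         padding_length = k - (len(phrase) % k) # calculer la longueur du remplissage
--         phrase += alphabet[0] * padding_length  # Remplir avec le premier caractère de l'alphabet
--     # Transformer chaque bloc en nombre
--     for i in range(0, len(phrase), k):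
--         bloc = phrase[i:i+k] # Extraire un bloc de k caractères
--         # Convertir le bloc en nombre grace a la formule Somme de (L^j)*index(bloc[j])
--         num = sum(alphabet.index(bloc[j]) * (L ** j) for j in range(len(bloc)))
--         code.append(num)
--     return code # retourner la liste des blocs
-- ===== SOURCE B (Python) =====
-- def codage_bloc(phrase, alphabet, k):
--     L = len(alphabet)
--     # one up-front pass: the phrase as base-L digits
--     digits = [alphabet.index(c) for c in phrase]
--     # pad with the digit 0 (the digit of alphabet[0]) up to a multiple of k
--     digits += [0] * (-len(digits) % k)
--     # single flat pass: running weight and a countdown to each block boundary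
--     code = []
--     num, w, cnt = 0, 1, k
--     for d in digits:
--         num += d * w
--         w *= L
--         cnt -= 1
--         if cnt == 0:
--             code.append(num)
--             num, w, cnt = 0, 1, k
--     return code
-- ===== Notes on version B (the rewrite author's own statement) =====
-- stated objective: faster
-- what changed: B first converts the whole phrase into a base-L digit list, pads it arithmetically with literal 0 digits ((-len)%k of them) instead of appending alphabet[0] characters, and then computes all block values in ONE flat pass with a running weight accumulator and a countdown block-boundary counter - no per-block slicing, no nested loop, no L**j power recomputation.
-- outside the precondition, e.g. on codage_bloc('b', 'a', -1): A returns [], B raises ValueError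
import Mathlib
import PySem

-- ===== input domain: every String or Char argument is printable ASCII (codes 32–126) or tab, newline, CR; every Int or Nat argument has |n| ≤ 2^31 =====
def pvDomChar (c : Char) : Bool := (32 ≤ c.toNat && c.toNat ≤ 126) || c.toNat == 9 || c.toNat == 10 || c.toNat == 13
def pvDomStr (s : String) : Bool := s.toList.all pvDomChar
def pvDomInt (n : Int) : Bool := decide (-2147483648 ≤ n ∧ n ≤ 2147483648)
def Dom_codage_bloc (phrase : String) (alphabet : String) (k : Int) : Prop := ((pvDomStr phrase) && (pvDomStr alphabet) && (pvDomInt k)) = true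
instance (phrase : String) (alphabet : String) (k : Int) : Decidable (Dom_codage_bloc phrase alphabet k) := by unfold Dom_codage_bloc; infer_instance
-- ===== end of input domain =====

-- B converts the phrase to a base-L digit list once, pads it arithmetically with 0 digits and
-- computes every block value in one flat pass (running weight + boundary countdown) instead of
-- A's nested loop over sliced blocks recomputing L**j power terms (objective: faster, as measured
-- in a timing run).

-- ===== PORT A =====
-- alphabet.index(bloc[j]); Python raises ValueError when the char is absent (excluded by Pre_); the default 0 is never reached under Pre_
def pvIndexA (al : List Char) (c : Char) : Int :=
  (((PySem.List.index? al c).getD 0 : Nat) : Int)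

-- if len(phrase) % k != 0: phrase += alphabet[0] * (k - len(phrase) % k)
-- (alphabet[0] on an empty alphabet raises IndexError: excluded by Pre_; headD's default is never reached there)
def pvPadA (p : List Char) (al : List Char) (k : Int) : List Char :=
  if PySem.Int.mod (p.length : Int) k ≠ 0 then
    p ++ List.replicate (k - PySem.Int.mod (p.length : Int) k).toNat (al.headD ' ')
  else p

-- num = sum(alphabet.index(bloc[j]) * L**j for j in range(len(bloc)))
def pvNumA (al : List Char) (bloc : List Char) : Int :=
  ((List.range bloc.length).map (fun j => pvIndexA al (bloc.getD j ' ') * ((al.length : Int)) ^ j)).sum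

def codage_bloc (phrase : String) (alphabet : String) (k : Int) : List Int :=
  let al := alphabet.toList
  let p := pvPadA phrase.toList al k
  (PySem.List.pyRange 0 (p.length : Int) k).foldl
    (fun code i => code ++ [pvNumA al (PySem.List.slice p (some i) (some (i + k)))]) []

-- ===== PORT B =====
-- alphabet.index(c) in B's digit-conversion pass (ValueError on absent chars: excluded by Pre_)
def pvIndexB (al : List Char) (c : Char) : Int :=
  (((PySem.List.index? al c).getD 0 : Nat) : Int)

-- the loop body: num += d*w; w *= L; cnt -= 1; if cnt == 0: append and reset
def pvStepB (k L : Int) (st : List Int × Int × Int × Int) (d : Int) : List Int × Int × Int × Int :=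
  let num := st.2.1 + d * st.2.2.1
  let w := st.2.2.1 * L
  let cnt := st.2.2.2 - 1
  if cnt = 0 then (st.1 ++ [num], 0, 1, k) else (st.1, num, w, cnt)

def codage_bloc_alt (phrase : String) (alphabet : String) (k : Int) : List Int :=
  let al := alphabet.toList
  let L := (al.length : Int)
  let digits := phrase.toList.map (fun c => pvIndexB al c)
  let padded := digits ++ List.replicate (PySem.Int.mod (-(digits.length : Int)) k).toNat 0
  (padded.foldl (pvStepB k L) ([], 0, 1, k)).1

-- ===== PRECONDITION & SPEC =====
-- Pre_ excludes k = 0 (A raises ZeroDivisionError on len % k) and phrases containing a character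
-- absent from the alphabet: for k > 0 A raises ValueError there (and IndexError on alphabet[0]
-- when the alphabet is empty and padding is needed), while for k < 0 A returns [] only because its
-- block loop never runs — B's upfront digit-conversion pass raises ValueError on those inputs.
def Pre_codage_bloc (phrase : String) (alphabet : String) (k : Int) : Prop :=
  k ≠ 0 ∧ phrase.toList.all (fun c => alphabet.toList.contains c) = true
instance (phrase : String) (alphabet : String) (k : Int) : Decidable (Pre_codage_bloc phrase alphabet k) := by unfold Pre_codage_bloc; infer_instance

def pvWitness_codage_bloc : String × String × Int := ("ab", "ab", 2)

def Spec_codage_bloc (phrase : String) (alphabet : String) (k : Int) (out : List Int) : Prop := out = codage_bloc_alt phrase alphabet k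
instance (phrase : String) (alphabet : String) (k : Int) (out : List Int) : Decidable (Spec_codage_bloc phrase alphabet k out) := by unfold Spec_codage_bloc; infer_instance

-- ===== CLAIM (what is proved, stated in full; the proofs are below) =====
def Claim_equal_codage_bloc : Prop := ∀ (phrase : String) (alphabet : String) (k : Int), Dom_codage_bloc phrase alphabet k → Pre_codage_bloc phrase alphabet k → Spec_codage_bloc phrase alphabet k (codage_bloc phrase alphabet k)

-- ===== LEMMAS AND PROOFS =====

-- little-endian base-L value of a digit list (proof-side characterisation of both block computations)
def pvValLE (L : Int) : List Int → Int
  | [] => 0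
  | d :: ds => d + L * pvValLE L ds

-- with a negative countdown the flat loop never appends (B on k < 0)
theorem foldB_neg (k L : Int) (ds : List Int) (acc : List Int) (num w cnt : Int) (h : cnt < 0) :
    (ds.foldl (pvStepB k L) (acc, num, w, cnt)).1 = acc := by
  induction ds generalizing num w cnt with
  | nil => rfl
  | cons d ds ih =>
    simp only [List.foldl_cons, pvStepB]
    rw [if_neg (by omega)]
    exact ih _ _ _ (by omega)

-- one chunk of the flat loop, started with the countdown equal to its length
theorem foldB_chunk (k L : Int) (chunk : List Int) (h : chunk ≠ []) (acc : List Int)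
    (num w cnt : Int) (hcnt : cnt = (chunk.length : Int)) :
    chunk.foldl (pvStepB k L) (acc, num, w, cnt) =
      (acc ++ [num + w * pvValLE L chunk], 0, 1, k) := by
  subst hcnt
  induction chunk generalizing acc num w with
  | nil => exact absurd rfl h
  | cons x xs ih =>
    have hstep : pvStepB k L (acc, num, w, ((x :: xs).length : Int)) x
        = if ((xs.length : Int)) = 0 then (acc ++ [num + x * w], 0, 1, k)
          else (acc, num + x * w, w * L, (xs.length : Int)) := by
      simp only [pvStepB, List.length_cons]
      have hc : ((xs.length + 1 : Nat) : Int) - 1 = (xs.length : Int) := by push_cast; ring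
      rw [hc]
    cases xs with
    | nil =>
      rw [List.foldl_cons, hstep, if_pos (by simp), List.foldl_nil]
      have : num + x * w = num + w * pvValLE L [x] := by simp [pvValLE]; ring
      rw [this]
    | cons y tl =>
      rw [List.foldl_cons, hstep, if_neg (by simp; omega), ih (by simp)]
      have : num + x * w + w * L * pvValLE L (y :: tl) = num + w * pvValLE L (x :: y :: tl) := by
        simp only [pvValLE]; ring
      rw [this]

-- the flat loop over m whole chunks produces the m little-endian block values
theorem foldB_blocks (k L : Int) (hk : 0 < k) (m : Nat) (ds : List Int) (acc : List Int)
    (hlen : ds.length = m * k.toNat) :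
    (ds.foldl (pvStepB k L) (acc, 0, 1, k)).1 =
      acc ++ (List.range m).map (fun j => pvValLE L ((ds.drop (j * k.toNat)).take k.toNat)) := by
  induction m generalizing ds acc with
  | zero =>
    have : ds = [] := List.eq_nil_of_length_eq_zero (by omega)
    subst this
    simp
  | succ m ih =>
    have hκ : 0 < k.toNat := by omega
    have hge : k.toNat ≤ ds.length := by
      rw [hlen, Nat.succ_mul]; omega
    have hsplit := List.take_append_drop k.toNat ds
    have htlen : (ds.take k.toNat).length = k.toNat := by
      simp [Nat.min_eq_left hge]
    have hne : ds.take k.toNat ≠ [] := by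
      intro hnil; rw [hnil] at htlen; simp at htlen; omega
    conv_lhs => rw [← hsplit]
    rw [List.foldl_append]
    have hcast : ((ds.take k.toNat).length : Int) = k := by
      rw [htlen]; omega
    rw [foldB_chunk k L _ hne _ _ _ _ hcast.symm]
    rw [ih (ds.drop k.toNat) _ (by simp [hlen, Nat.succ_mul])]
    rw [List.range_succ_eq_map]
    simp only [List.map_cons, List.map_map, Function.comp_def, Nat.zero_mul, List.drop_zero,
      Nat.succ_mul, List.append_assoc, List.singleton_append]
    rw [show (0:Int) + 1 * pvValLE L (ds.take k.toNat) = pvValLE L (ds.take k.toNat) from by ring]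
    congr 1
    congr 1
    apply List.map_congr_left
    intro j _
    rw [List.drop_drop, Nat.add_comm]

-- A's block loop as a map over the m chunk slices
theorem A_blocks (al : List Char) (k : Int) (hk : 0 < k) (m : Nat) (p : List Char)
    (hlen : p.length = m * k.toNat) :
    (PySem.List.pyRange 0 (p.length : Int) k).foldl
        (fun code i => code ++ [pvNumA al (PySem.List.slice p (some i) (some (i + k)))]) [] =
      (List.range m).map (fun j => pvNumA al ((p.drop (j * k.toNat)).take k.toNat)) := by
  rw [PySem.List.foldl_append_singleton_eq_map, List.nil_append]
  rw [PySem.List.pyRange_of_pos 0 _ hk]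
  have hκ : (k.toNat : Int) = k := by omega
  have hcount : (if (0:Int) < (p.length : Int) then (((p.length : Int) - 0 + k - 1) / k).toNat else 0) = m := by
    by_cases hp : (0:Int) < (p.length : Int)
    · rw [if_pos hp]
      have hml : (p.length : Int) = (m : Int) * k := by
        rw [hlen]; push_cast; rw [hκ]
      rw [hml]
      have : (m : Int) * k - 0 + k - 1 = (k - 1) + (m : Int) * k := by ring
      rw [this, Int.add_mul_ediv_right _ _ (by omega)]
      rw [Int.ediv_eq_zero_of_lt (by omega) (by omega)]
      simp
    · rw [if_neg hp]
      have hp0 : p.length = 0 := by omega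
      have h0 : m * k.toNat = 0 := by rw [← hlen, hp0]
      rcases Nat.mul_eq_zero.mp h0 with h | h <;> omega
  rw [hcount, List.map_map]
  apply List.map_congr_left
  intro j _
  simp only [Function.comp_def]
  have h2 : (0 : Int) + k * (j : Int) + k = ((j * k.toNat : Nat) : Int) + ((k.toNat : Nat) : Int) := by
    push_cast; rw [hκ]; ring
  have h1 : (0 : Int) + k * (j : Int) = ((j * k.toNat : Nat) : Int) := by
    push_cast; rw [hκ]; ring
  rw [h2, h1]
  rw [PySem.List.slice_natCast_add]

-- A's power sum is the little-endian value of the block's digits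
theorem numA_eq_valLE (al : List Char) (bloc : List Char) :
    pvNumA al bloc = pvValLE (al.length : Int) (bloc.map (pvIndexA al)) := by
  induction bloc with
  | nil => simp [pvNumA, pvValLE]
  | cons x xs ih =>
    unfold pvNumA at *
    rw [List.map_cons, pvValLE, ← ih]
    rw [List.length_cons, List.range_succ_eq_map]
    simp only [List.map_cons, List.sum_cons, List.map_map, Function.comp_def,
      List.getD_cons_succ, List.getD_cons_zero, pow_zero, mul_one]
    have h : (List.map (fun j => pvIndexA al (xs.getD j ' ') * (al.length : Int) ^ (j + 1)) (List.range xs.length)).sum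
        = (al.length : Int) * (List.map (fun j => pvIndexA al (xs.getD j ' ') * (al.length : Int) ^ j) (List.range xs.length)).sum := by
      rw [← List.sum_map_mul_left]
      exact congrArg List.sum (List.map_congr_left (fun j _ => by rw [pow_succ]; ring))
    rw [h]

-- Python floor-mod arithmetic: the digit-space padding count equals A's character padding count
theorem pad_count_eq (n k : Int) (hk : 0 < k) (h : PySem.Int.mod n k ≠ 0) :
    (PySem.Int.mod (-n) k).toNat = (k - PySem.Int.mod n k).toNat := by
  rw [PySem.Int.mod_eq_emod_of_pos hk] at h ⊢
  rw [PySem.Int.mod_eq_emod_of_pos hk]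
  have h2 : 0 ≤ n % k := Int.emod_nonneg n (by omega)
  have h3 : n % k < k := Int.emod_lt_of_pos n hk
  have e : -n = (k - n % k) + k * (-(n / k) - 1) := by
    linear_combination Int.emod_add_mul_ediv n k
  rw [e, Int.add_mul_emod_self_left, Int.emod_eq_of_lt (by omega) (by omega)]

-- the padded digit list is the digit list of A's padded phrase
theorem padded_digits (al : List Char) (k : Int) (hk : 0 < k) (p : List Char)
    (hmem : p.all (fun c => al.contains c) = true) :
    (p.map (pvIndexB al)) ++ List.replicate (PySem.Int.mod (-(p.length : Int)) k).toNat 0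
      = (pvPadA p al k).map (pvIndexA al) := by
  unfold pvPadA
  by_cases h0 : PySem.Int.mod (p.length : Int) k = 0
  · rw [if_neg (by simpa using h0)]
    have hneg : PySem.Int.mod (-(p.length : Int)) k = 0 := by
      rw [PySem.Int.mod_eq_zero_iff_dvd] at h0 ⊢
      exact Dvd.dvd.neg_right h0
    rw [hneg]
    simp [pvIndexB, pvIndexA]
  · rw [if_pos h0]
    cases p with
    | nil =>
      exfalso
      apply h0
      rw [PySem.Int.mod_eq_zero_iff_dvd]
      simp
    | cons a tl =>
      cases al with
      | nil => simp at hmem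
      | cons b bl =>
        rw [List.map_append, List.map_replicate]
        have hval : pvIndexA (b :: bl) ((b :: bl).headD ' ') = 0 := by
          show (((PySem.List.index? (b :: bl) b).getD 0 : Nat) : Int) = 0
          rw [PySem.List.index?_cons_self]
          rfl
        rw [hval, pad_count_eq _ _ hk h0]
        rfl

-- the padded phrase's length is a whole number of blocks
theorem padA_dvd (al : List Char) (k : Int) (hk : 0 < k) (p : List Char) :
    k.toNat ∣ (pvPadA p al k).length := by
  unfold pvPadA
  by_cases h0 : PySem.Int.mod (p.length : Int) k = 0
  · rw [if_neg (by simpa using h0)]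
    rw [PySem.Int.mod_eq_zero_iff_dvd] at h0
    obtain ⟨c, hc⟩ := h0
    have hkc : 0 ≤ k * c := by omega
    have hc0 : 0 ≤ c := nonneg_of_mul_nonneg_right hkc hk
    refine ⟨c.toNat, ?_⟩
    have : ((p.length : Nat) : Int) = ((k.toNat * c.toNat : Nat) : Int) := by
      push_cast
      rw [Int.toNat_of_nonneg hc0, Int.toNat_of_nonneg (le_of_lt hk)]
      exact hc
    exact_mod_cast this
  · rw [if_pos h0]
    rw [PySem.Int.mod_eq_emod_of_pos hk] at h0 ⊢
    have e : (p.length : Int) % k + k * ((p.length : Int) / k) = (p.length : Int) :=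
      Int.emod_add_mul_ediv _ _
    have h2 : 0 ≤ (p.length : Int) % k := Int.emod_nonneg _ (by omega)
    have h3 : (p.length : Int) % k < k := Int.emod_lt_of_pos _ hk
    have hq0 : 0 ≤ (p.length : Int) / k := Int.ediv_nonneg (by positivity) (le_of_lt hk)
    refine ⟨((p.length : Int) / k + 1).toNat, ?_⟩
    have : ((p.length + (k - (p.length : Int) % k).toNat : Nat) : Int)
        = ((k.toNat * ((p.length : Int) / k + 1).toNat : Nat) : Int) := by
      push_cast [Int.toNat_of_nonneg (by omega : (0:Int) ≤ k - (p.length : Int) % k),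
        Int.toNat_of_nonneg (by omega : (0:Int) ≤ (p.length : Int) / k + 1),
        Int.toNat_of_nonneg (le_of_lt hk)]
      linear_combination - e
    simp only [List.length_append, List.length_replicate]
    exact_mod_cast this

-- ===== VERDICT (by name: the statement is the Claim_ definition above) =====
theorem codage_bloc_spec : Claim_equal_codage_bloc := by
  intro phrase alphabet k _ hpre
  obtain ⟨hk0, hmem⟩ := hpre
  unfold Spec_codage_bloc codage_bloc codage_bloc_alt
  simp only [List.length_map]
  rcases lt_or_gt_of_ne hk0 with hneg | hpos
  · -- k < 0: A's range is empty and B's countdown never fires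
    have hA : PySem.List.pyRange 0 ((pvPadA phrase.toList alphabet.toList k).length : Int) k
        = [] := by
      unfold PySem.List.pyRange
      rw [if_neg hk0, if_neg (by omega), if_neg (by omega)]
      simp
    rw [hA, List.foldl_nil]
    exact (foldB_neg _ _ _ _ _ _ _ hneg).symm
  · -- k > 0
    obtain ⟨m, hm⟩ := padA_dvd alphabet.toList k hpos phrase.toList
    rw [A_blocks alphabet.toList k hpos m _ (by rw [hm, Nat.mul_comm])]
    rw [padded_digits alphabet.toList k hpos phrase.toList hmem]
    rw [foldB_blocks k _ hpos m _ [] (by simp [hm, Nat.mul_comm])]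
    rw [List.nil_append]
    apply List.map_congr_left
    intro j _
    rw [← List.map_drop, ← List.map_take, numA_eq_valLE]
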